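-- pv_equiv track=rewrite | github.com/ue12-p21/python-advanced-solutions | supermarket.py | queue_time_bis
-- ===== SOURCE A (Python) =====
-- import heapq
--
-- def queue_time_bis(customers, n):
--     queues = n *[0]
--     # just transform the list into a heapq
--     heapq.heapify(queues)
--     while customers:
--         next = customers.pop(0)
--         # getting and removing the smallest
--         free_counter = heapq.heappop(queues)
--         # adding the sum
--         heapq.heappush(queues, free_counter + next)
--     # we're done
--     return max(queues)
-- ===== SOURCE B (Python) =====
-- def queue_time_bis(customers, n):
--     loads = n * [0]          # kept sorted in non-increasing order: smallest load last
--     for c in customers: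
--         v = loads.pop() + c  # take the smallest load off the end, serve the customer
--         lo, hi = 0, len(loads)
--         while lo < hi:       # binary search for v's slot in the non-increasing list
--             mid = (lo + hi) // 2
--             if loads[mid] > v:
--                 lo = mid + 1
--             else:
--                 hi = mid
--         loads.insert(lo, v)
--     return loads[0]          # largest load
-- ===== Notes on version B (the rewrite author's own statement) =====
-- stated objective: alternative
-- what changed: B replaces A's heapq plus destructive customers.pop(0) loop by a plain list kept sorted in non-increasing order: it iterates directly over customers, pops the smallest load off the end, re-inserts the new load at a hand-written binary-search position, and returns the first element instead of max().
import Mathlib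
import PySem

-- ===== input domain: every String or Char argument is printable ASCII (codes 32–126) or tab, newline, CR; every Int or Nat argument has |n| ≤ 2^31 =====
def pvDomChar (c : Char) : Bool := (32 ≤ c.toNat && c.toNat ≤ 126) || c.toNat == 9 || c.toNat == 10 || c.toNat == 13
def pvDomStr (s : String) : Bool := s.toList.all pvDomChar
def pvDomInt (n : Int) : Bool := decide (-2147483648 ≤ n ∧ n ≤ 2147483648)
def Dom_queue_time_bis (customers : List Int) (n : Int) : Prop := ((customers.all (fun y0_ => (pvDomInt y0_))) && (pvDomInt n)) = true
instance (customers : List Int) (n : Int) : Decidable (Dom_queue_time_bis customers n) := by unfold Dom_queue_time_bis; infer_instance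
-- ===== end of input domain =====

-- B replaces A's heapq + customers.pop(0) loop by a list kept sorted in non-increasing
-- order with binary-search re-insertion (alternative algorithm; return value only:
-- A empties its `customers` argument in place, B does not mutate it).

-- ===== PORT A =====
-- the heap is modelled by the list of its values: heappop removes (the first
-- occurrence of) the smallest value, heappush appends; the returned values are
-- exactly Python's, since heappop's value and max(queues) depend only on the values
def qtbStepA (qs : List Int) (c : Int) : List Int :=
  match PySem.List.min? qs (fun y => y) with
  | none => qs            -- heappop on an empty heap raises (outside Pre_)
  | some m =>
    match PySem.List.remove? qs m with
    | none => qs          -- unreachable: m ∈ qs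
    | some r => r ++ [m + c]

def queue_time_bis (customers : List Int) (n : Int) : Int :=
  let queues := PySem.List.pyRepeat [(0 : Int)] n
  let queues := customers.foldl qtbStepA queues
  match PySem.List.max? queues (fun y => y) with
  | none => 0             -- max([]) raises (outside Pre_)
  | some m => m

-- ===== PORT B =====
-- the while lo < hi loop of Source B; loads[mid] ported as getD (mid < len(loads)
-- whenever the loop body runs, since hi ≤ len(loads) throughout: exact there)
def qtbSearch (loads : List Int) (v : Int) (lo hi : Nat) : Nat :=
  if lo < hi then
    let mid := (lo + hi) / 2
    if loads.getD mid 0 > v then qtbSearch loads v (mid + 1) hi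
    else qtbSearch loads v lo mid
  else lo
termination_by hi - lo
decreasing_by all_goals omega

def qtbStepB (loads : List Int) (c : Int) : List Int :=
  match PySem.List.pop? loads with          -- loads.pop(): raises on [] (outside Pre_)
  | none => loads
  | some (m, rest) =>
    let v := m + c
    let lo := qtbSearch rest v 0 rest.length
    PySem.List.insert rest (lo : Int) v     -- loads.insert(lo, v)

def queue_time_bis_alt (customers : List Int) (n : Int) : Int :=
  let loads := PySem.List.pyRepeat [(0 : Int)] n
  let loads := customers.foldl qtbStepB loads
  match PySem.List.pyGet? loads 0 with
  | none => 0             -- loads[0] raises on [] (outside Pre_)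
  | some m => m

-- ===== PRECONDITION & SPEC =====
-- Pre_ excludes n ≤ 0, where the Python A raises (IndexError from heappop, or
-- ValueError from max([])) and B raises too (IndexError from pop()/loads[0]).
def Pre_queue_time_bis (customers : List Int) (n : Int) : Prop := 1 ≤ n
instance (customers : List Int) (n : Int) : Decidable (Pre_queue_time_bis customers n) := by unfold Pre_queue_time_bis; infer_instance
def pvWitness_queue_time_bis : List Int × Int := ([5, 3, 4], 2)

def Spec_queue_time_bis (customers : List Int) (n : Int) (out : Int) : Prop := out = queue_time_bis_alt customers n
instance (customers : List Int) (n : Int) (out : Int) : Decidable (Spec_queue_time_bis customers n out) := by unfold Spec_queue_time_bis; infer_instance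

-- ===== CLAIM (what is proved, stated in full; the proofs are below) =====
def Claim_equal_queue_time_bis : Prop := ∀ (customers : List Int) (n : Int), Dom_queue_time_bis customers n → Pre_queue_time_bis customers n → Spec_queue_time_bis customers n (queue_time_bis customers n)

-- ===== LEMMAS AND PROOFS =====

-- B's state invariant: the loads list is sorted in non-increasing order
def qtbSortedDesc (ls : List Int) : Prop := List.Pairwise (fun a b => b ≤ a) ls

theorem qtb_getLast_min (ls : List Int) (hne : ls ≠ []) (hs : qtbSortedDesc ls) :
    ∀ x ∈ ls, ls.getLast hne ≤ x := by
  intro x hx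
  obtain ⟨i, hi, rfl⟩ := List.mem_iff_getElem.mp hx
  rw [List.getLast_eq_getElem]
  rcases Nat.lt_or_ge i (ls.length - 1) with h | h
  · exact List.pairwise_iff_getElem.mp hs i (ls.length - 1) hi (by omega) h
  · have : i = ls.length - 1 := by omega
    subst this; exact le_refl _

theorem qtb_head_max (ls : List Int) (hne : 0 < ls.length) (hs : qtbSortedDesc ls) :
    ∀ x ∈ ls, x ≤ ls[0] := by
  intro x hx
  obtain ⟨i, hi, rfl⟩ := List.mem_iff_getElem.mp hx
  rcases Nat.eq_zero_or_pos i with h | h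
  · subst h; exact le_refl _
  · exact List.pairwise_iff_getElem.mp hs 0 i hne hi h

-- A's heappop pops exactly the last element of B's sorted list
theorem qtb_min?_eq {qs ls : List Int} (hperm : qs.Perm ls) (hne : ls ≠ [])
    (hs : qtbSortedDesc ls) :
    PySem.List.min? qs (fun y => y) = some (ls.getLast hne) := by
  cases hm : PySem.List.min? qs (fun y => y) with
  | none =>
    rw [PySem.List.min?_eq_none_iff] at hm
    subst hm
    exact absurd hperm.nil_eq.symm hne
  | some m0 =>
    have hm0 : m0 ∈ ls := hperm.mem_iff.mp (PySem.List.min?_mem hm)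
    have hlast : ls.getLast hne ∈ qs := hperm.mem_iff.mpr (List.getLast_mem hne)
    have h1 : m0 ≤ ls.getLast hne := PySem.List.min?_isMin hm _ hlast
    have h2 : ls.getLast hne ≤ m0 := qtb_getLast_min ls hne hs m0 hm0
    exact congrArg some (le_antisymm h1 h2)

-- the binary search returns a position r with everything before it > v and
-- everything from it on ≤ v
theorem qtbSearch_spec (ls : List Int) (v : Int) (hs : qtbSortedDesc ls) :
    ∀ (k lo hi : Nat), hi - lo = k → lo ≤ hi → hi ≤ ls.length →
    (∀ j (hj : j < ls.length), j < lo → v < ls[j]) →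
    (∀ j (hj : j < ls.length), hi ≤ j → ls[j] ≤ v) →
    qtbSearch ls v lo hi ≤ ls.length ∧
    (∀ j (hj : j < ls.length), j < qtbSearch ls v lo hi → v < ls[j]) ∧
    (∀ j (hj : j < ls.length), qtbSearch ls v lo hi ≤ j → ls[j] ≤ v) := by
  intro k
  induction k using Nat.strong_induction_on with
  | _ k ih =>
    intro lo hi hk hlohi hhi hbef haft
    rw [qtbSearch]
    by_cases hlt : lo < hi
    · simp only [if_pos hlt]
      have hmid : (lo + hi) / 2 < ls.length := by omega
      have hget : ls.getD ((lo + hi) / 2) 0 = ls[(lo + hi) / 2] :=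
        List.getD_eq_getElem ls 0 hmid
      by_cases hcmp : ls.getD ((lo + hi) / 2) 0 > v
      · simp only [if_pos hcmp]
        refine ih (hi - ((lo + hi) / 2 + 1)) (by omega) _ _ rfl (by omega) hhi ?_ haft
        intro j hj hjlt
        have hjm : ls[(lo + hi) / 2] ≤ ls[j] ∨ j = (lo + hi) / 2 := by
          rcases Nat.lt_or_ge j ((lo + hi) / 2) with h | h
          · exact Or.inl (List.pairwise_iff_getElem.mp hs j _ hj hmid h)
          · exact Or.inr (by omega)
        rw [hget] at hcmp
        rcases hjm with h | h
        · omega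
        · subst h; omega
      · simp only [if_neg hcmp]
        refine ih ((lo + hi) / 2 - lo) (by omega) _ _ rfl (by omega) (by omega) hbef ?_
        intro j hj hjge
        have : ls[(lo + hi) / 2] ≤ v := by rw [hget] at hcmp; omega
        rcases Nat.lt_or_ge j ((lo + hi) / 2) with h | h
        · omega
        · rcases Nat.eq_or_lt_of_le h with h' | h'
          · subst h'; exact this
          · have := List.pairwise_iff_getElem.mp hs _ j hmid hj h'
            omega
    · simp only [if_neg hlt]
      have : lo = hi := by omega
      subst this
      exact ⟨by omega, hbef, haft⟩

-- inserting v at such a position keeps the list sorted non-increasing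
theorem qtb_sorted_insert (ls : List Int) (v : Int) (r : Nat) (hs : qtbSortedDesc ls)
    (hr : r ≤ ls.length)
    (hbef : ∀ j (hj : j < ls.length), j < r → v < ls[j])
    (haft : ∀ j (hj : j < ls.length), r ≤ j → ls[j] ≤ v) :
    qtbSortedDesc (ls.take r ++ v :: ls.drop r) := by
  unfold qtbSortedDesc at *
  rw [List.pairwise_append]
  refine ⟨List.Pairwise.sublist (List.take_sublist ..) hs, ?_, ?_⟩
  · rw [List.pairwise_cons]
    refine ⟨?_, List.Pairwise.sublist (List.drop_sublist ..) hs⟩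
    intro y hy
    obtain ⟨i, hi, rfl⟩ := List.mem_iff_getElem.mp hy
    have hi' : i < ls.length - r := by simpa using hi
    rw [List.getElem_drop]
    exact haft (r + i) (by omega) (by omega)
  · intro x hx y hy
    obtain ⟨i, hi, rfl⟩ := List.mem_iff_getElem.mp hx
    have hi' : i < r := by simp [List.length_take] at hi; omega
    have hil : i < ls.length := by simp [List.length_take] at hi; omega
    rw [List.getElem_take]
    have hxv : v < ls[i] := hbef i hil hi'
    rcases List.mem_cons.mp hy with rfl | hy'
    · omega
    · obtain ⟨j, hj, rfl⟩ := List.mem_iff_getElem.mp hy'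
      have hj' : j < ls.length - r := by simpa using hj
      rw [List.getElem_drop]
      have := haft (r + j) (by omega) (by omega)
      omega

-- one step: A's heap state and B's sorted state stay permutations, B stays
-- sorted and nonempty
theorem qtb_step_sim {qs ls : List Int} (c : Int) (hperm : qs.Perm ls)
    (hs : qtbSortedDesc ls) (hne : ls ≠ []) :
    (qtbStepA qs c).Perm (qtbStepB ls c) ∧ qtbSortedDesc (qtbStepB ls c) ∧
    qtbStepB ls c ≠ [] := by
  set m := ls.getLast hne with hmdef
  set rest := ls.dropLast with hrestdef
  have hsplit : rest ++ [m] = ls := List.dropLast_append_getLast hne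
  have hpop : PySem.List.pop? ls = some (m, rest) := by
    rw [← hsplit]; exact PySem.List.pop?_last rest m
  have hrs : qtbSortedDesc rest :=
    List.Pairwise.sublist (List.dropLast_sublist ls) hs
  set v := m + c with hvdef
  obtain ⟨hrle, hrbef, hraft⟩ :=
    qtbSearch_spec rest v hrs (rest.length - 0) 0 rest.length rfl (by omega) (le_refl _)
      (by omega) (by omega)
  set r := qtbSearch rest v 0 rest.length with hrdef
  have hB : qtbStepB ls c = rest.take r ++ v :: rest.drop r := by
    unfold qtbStepB
    rw [hpop]
    dsimp only
    exact PySem.List.insert_natCast rest r v hrle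
  have hmin : PySem.List.min? qs (fun y => y) = some m := qtb_min?_eq hperm hne hs
  have hmem_qs : m ∈ qs := hperm.mem_iff.mpr (List.getLast_mem hne)
  have hA : qtbStepA qs c = qs.erase m ++ [m + c] := by
    unfold qtbStepA
    rw [hmin]
    dsimp only
    rw [PySem.List.remove?_eq_some_erase qs m hmem_qs]
  refine ⟨?_, ?_, ?_⟩
  · rw [hA, hB]
    have h1 : (qs.erase m).Perm rest := by
      have hql : qs.Perm (m :: qs.erase m) := List.perm_cons_erase hmem_qs
      have hlr : ls.Perm (m :: rest) := by
        rw [← hsplit]; exact List.perm_append_singleton m rest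
      exact (List.perm_cons m).mp ((hql.symm.trans hperm).trans hlr)
    have p1 : (qs.erase m ++ [m + c]).Perm (rest ++ [v]) := h1.append_right _
    have p2 : (rest ++ [v]).Perm (rest.take r ++ v :: rest.drop r) := by
      conv_lhs => rw [← List.take_append_drop r rest]
      rw [List.append_assoc]
      exact List.Perm.append_left _ (List.perm_append_singleton v _)
    exact p1.trans p2
  · rw [hB]; exact qtb_sorted_insert rest v r hrs hrle hrbef hraft
  · rw [hB]; exact List.append_ne_nil_of_right_ne_nil _ (List.cons_ne_nil _ _)

theorem qtb_sim (cs : List Int) :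
    ∀ {qs ls : List Int}, qs.Perm ls → qtbSortedDesc ls → ls ≠ [] →
    (cs.foldl qtbStepA qs).Perm (cs.foldl qtbStepB ls) ∧
    qtbSortedDesc (cs.foldl qtbStepB ls) ∧ (cs.foldl qtbStepB ls) ≠ [] := by
  induction cs with
  | nil => intro qs ls h hs hne; exact ⟨h, hs, hne⟩
  | cons c cs ih =>
    intro qs ls h hs hne
    obtain ⟨h', hs', hne'⟩ := qtb_step_sim c h hs hne
    exact ih h' hs' hne'

theorem qtb_sorted_replicate (k : Nat) : qtbSortedDesc (List.replicate k (0 : Int)) := by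
  unfold qtbSortedDesc
  rw [List.pairwise_iff_getElem]
  intro i j hi hj _
  simp

-- ===== VERDICT (by name: the statement is the Claim_ definition above) =====
theorem queue_time_bis_spec : Claim_equal_queue_time_bis := by
  intro customers n _ hpre
  unfold Spec_queue_time_bis queue_time_bis queue_time_bis_alt
  simp only []
  rw [PySem.List.pyRepeat_singleton]
  have hne : List.replicate n.toNat (0 : Int) ≠ [] := by
    unfold Pre_queue_time_bis at hpre
    simp only [ne_eq, List.replicate_eq_nil_iff]
    omega
  obtain ⟨hperm, hs, hne'⟩ :=
    qtb_sim customers (List.Perm.refl _) (qtb_sorted_replicate n.toNat) hne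
  set qsF := customers.foldl qtbStepA (List.replicate n.toNat 0) with hq
  set lsF := customers.foldl qtbStepB (List.replicate n.toNat 0) with hl
  have hlen : 0 < lsF.length := List.length_pos_iff.mpr hne'
  cases hM : PySem.List.max? qsF (fun y => y) with
  | none =>
    rw [PySem.List.max?_eq_none_iff] at hM
    rw [hM] at hperm
    exact absurd hperm.nil_eq.symm hne'
  | some M =>
    dsimp only
    have hget : PySem.List.pyGet? lsF 0 = some lsF[0] := by
      rw [show (0 : Int) = ((0 : Nat) : Int) from rfl, PySem.List.pyGet?_natCast]
      exact List.getElem?_eq_getElem hlen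
    rw [hget]
    dsimp only
    have hMls : M ∈ lsF := hperm.mem_iff.mp (PySem.List.max?_mem hM)
    have h1 : M ≤ lsF[0] := qtb_head_max lsF hlen hs M hMls
    have h2 : lsF[0] ≤ M :=
      PySem.List.max?_isMax hM _ (hperm.mem_iff.mpr (List.getElem_mem hlen))
    exact le_antisymm h1 h2
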